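-- pv_equiv track=rewrite | github.com/career-prep/ucp-namer-latam-2026 | homework3/gabriele_lisci/q6_RoadNetworks.py | roadNetworks
-- ===== SOURCE A (Python) =====
-- import collections
--
-- def roadNetworks(towns, roads):
--     graph = {}
--     for town in towns:
--         graph[town] = []
--     for road in roads:
--         graph[road[0]].append(road[1])
--         graph[road[1]].append(road[0])
--
--     visited = set()
--     roadNetworks = 0
--     for town in towns:
--         if town not in visited:
--             q = collections.deque()
--             q.append(town)
--             visited.add(town)
--             currSize = 0
--             while q:
--                 curr = q.popleft()
--                 currSize += 1
--                 for nei in graph[curr]: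
--                     if nei not in visited:
--                         visited.add(nei)
--                         q.append(nei)
--             if currSize > 1:
--                 roadNetworks += 1
--     return roadNetworks
-- ===== SOURCE B (Python) =====
-- def roadNetworks(towns, roads):
--     groups = []
--     for t in towns:
--         if not any(t in g for g in groups):
--             groups.append([t])
--     for a, b in roads:
--         ga = next(g for g in groups if a in g)
--         gb = next(g for g in groups if b in g)
--         if ga != gb:
--             groups.remove(ga)
--             groups.remove(gb)
--             groups.append(ga + gb)
--     return sum(1 for g in groups if len(g) > 1)
-- ===== Notes on version B (the rewrite author's own statement) =====
-- stated objective: alternative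
-- what changed: Replaces the adjacency-dict + per-component BFS with a merge-find partition: each town starts in its own group, each road merges the two groups of its endpoints, and non-singleton groups are counted directly.
import Mathlib
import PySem

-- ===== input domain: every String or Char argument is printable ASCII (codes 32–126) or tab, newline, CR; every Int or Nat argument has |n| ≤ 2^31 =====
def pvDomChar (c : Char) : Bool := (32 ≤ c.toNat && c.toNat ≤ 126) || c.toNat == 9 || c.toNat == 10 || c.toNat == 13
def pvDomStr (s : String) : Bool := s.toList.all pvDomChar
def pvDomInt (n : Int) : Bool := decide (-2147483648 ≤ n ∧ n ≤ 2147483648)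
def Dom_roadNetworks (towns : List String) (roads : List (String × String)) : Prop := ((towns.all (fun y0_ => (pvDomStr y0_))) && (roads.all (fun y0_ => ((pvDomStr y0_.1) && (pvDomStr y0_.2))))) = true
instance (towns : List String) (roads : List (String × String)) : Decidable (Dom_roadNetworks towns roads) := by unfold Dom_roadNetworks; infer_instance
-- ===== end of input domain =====

-- B replaces BFS over an adjacency dict by a merge-find partition fold over the roads; equivalence is
-- about the return value (A mutates nothing observable).

-- ===== PORT A =====
-- graph = {}; for town in towns: graph[town] = []; for road in roads: graph[road[0]].append(road[1]); graph[road[1]].append(road[0])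
-- (inside Pre_ every road endpoint is a key, so Dict.modify equals Python's KeyError-free in-place append)
def pvBuildGraph (towns : List String) (roads : List (String × String)) : PySem.Dict String (List String) :=
  roads.foldl
    (fun g r => (g.modify r.1 [] (fun l => l ++ [r.2])).modify r.2 [] (fun l => l ++ [r.1]))
    (towns.foldl (fun g t => g.insert t ([] : List String)) PySem.Dict.empty)

-- for nei in graph[curr]: if nei not in visited: visited.add(nei); q.append(nei)
def pvNeis (s : PySem.Set String × List String) (neis : List String) : PySem.Set String × List String :=
  neis.foldl
    (fun s nei => if PySem.Set.contains s.1 nei then s else (PySem.Set.add s.1 nei, s.2 ++ [nei])) s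

theorem pvNeis_cons (v : PySem.Set String) (q : List String) (a : String) (rest : List String) :
    pvNeis (v, q) (a :: rest)
      = pvNeis (if PySem.Set.contains v a then (v, q) else (PySem.Set.add v a, q ++ [a])) rest := by
  by_cases hc : PySem.Set.contains v a = true <;> simp [pvNeis, List.foldl_cons, hc]

-- universe of strings the BFS can ever touch (used only by the termination measure)
def pvU (towns : List String) (roads : List (String × String)) : List String :=
  PySem.List.dedup (towns ++ roads.flatMap (fun r => [r.1, r.2]))

def pvUnvis (towns : List String) (roads : List (String × String)) (visited : PySem.Set String) : Nat :=
  ((pvU towns roads).filter (fun x => !(PySem.Set.contains visited x))).length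

-- ---- lemmas the port needs for termination (cited in decreasing_by) ----

theorem pv_getD_init (towns : List String) (x : String) :
    (towns.foldl (fun g t => g.insert t ([] : List String)) PySem.Dict.empty).getD x [] = [] := by
  suffices h : ∀ (d : PySem.Dict String (List String)), d.getD x [] = [] →
      (towns.foldl (fun g t => g.insert t ([] : List String)) d).getD x [] = [] from
    h PySem.Dict.empty (PySem.Dict.getD_empty _ _)
  induction towns with
  | nil => intro d hd; simpa using hd
  | cons t ts ih =>
    intro d hd
    simp only [List.foldl_cons]
    exact ih _ (by rw [PySem.Dict.getD_insert]; split <;> simp [hd])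

theorem pv_buildGraph_getD (towns : List String) (roads : List (String × String)) (x : String) :
    (pvBuildGraph towns roads).getD x []
      = ((roads.flatMap (fun r => [(r.1, r.2), (r.2, r.1)])).filter (fun p => p.1 == x)).map (·.2) := by
  have hsplit : ∀ (rs : List (String × String)) (d : PySem.Dict String (List String)),
      rs.foldl (fun g r => (g.modify r.1 [] (fun l => l ++ [r.2])).modify r.2 [] (fun l => l ++ [r.1])) d
        = (rs.flatMap (fun r => [(r.1, r.2), (r.2, r.1)])).foldl
            (fun g p => g.modify p.1 [] (fun l => l ++ [p.2])) d := by
    intro rs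
    induction rs with
    | nil => intro d; rfl
    | cons r rest ih => intro d; simp only [List.foldl_cons, List.flatMap_cons, List.foldl_append, ih]; rfl
  unfold pvBuildGraph
  rw [hsplit, PySem.Dict.getD_foldl_modify_append, pv_getD_init]
  simp

theorem pv_mem_getD_U (towns : List String) (roads : List (String × String)) (x y : String)
    (h : y ∈ (pvBuildGraph towns roads).getD x []) : y ∈ pvU towns roads := by
  rw [pv_buildGraph_getD] at h
  simp only [List.mem_map, List.mem_filter, List.mem_flatMap] at h
  obtain ⟨p, ⟨⟨r, hr, hp⟩, -⟩, rfl⟩ := h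
  unfold pvU
  rw [PySem.List.mem_dedup]
  simp only [List.mem_append, List.mem_flatMap]
  refine Or.inr ⟨r, hr, ?_⟩
  simp at hp ⊢
  rcases hp with h1 | h1 <;> simp [h1]

theorem pv_filter_mono_length {α : Type} (l : List α) (p q : α → Bool)
    (h : ∀ a, p a = true → q a = true) : (l.filter p).length ≤ (l.filter q).length := by
  induction l with
  | nil => simp
  | cons a t ih =>
    simp only [List.filter_cons]
    by_cases hp : p a = true
    · rw [if_pos hp, if_pos (h a hp)]
      simp only [List.length_cons]; omega
    · rw [if_neg hp]
      split
      · simp only [List.length_cons]; omega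
      · exact ih

theorem pv_filter_drop_length {α : Type} [DecidableEq α] (l : List α) (p : α → Bool) (x : α)
    (hx : x ∈ l) (hpx : p x = true) :
    (l.filter (fun z => p z && !(z == x))).length + 1 ≤ (l.filter p).length := by
  induction l with
  | nil => simp at hx
  | cons a t ih =>
    simp only [List.filter_cons]
    by_cases hax : a = x
    · subst hax
      rw [if_neg (by simp [hpx]), if_pos hpx]
      have := pv_filter_mono_length t (fun z => p z && !(z == a)) p (by intro z h; exact (Bool.and_elim_left h))
      simp only [List.length_cons]; omega
    · have hx' : x ∈ t := (List.mem_cons.mp hx).resolve_left (fun h => hax h.symm)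
      have ih' := ih hx'
      have hbe : (a == x) = false := by simp [hax]
      by_cases hpa : p a = true
      · rw [if_pos (by simp [hpa, hbe]), if_pos hpa]
        simp only [List.length_cons]; omega
      · rw [if_neg (by simp [hpa]), if_neg hpa]
        exact ih'

theorem pv_neis_measure (towns : List String) (roads : List (String × String))
    (neis : List String) (hn : ∀ y ∈ neis, y ∈ pvU towns roads) (v : PySem.Set String) (q : List String) :
    (pvNeis (v, q) neis).2.length + pvUnvis towns roads (pvNeis (v, q) neis).1
        ≤ q.length + pvUnvis towns roads v
      ∧ pvUnvis towns roads (pvNeis (v, q) neis).1 ≤ pvUnvis towns roads v := by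
  induction neis generalizing v q with
  | nil => exact ⟨le_refl _, le_refl _⟩
  | cons a rest ih =>
    have ha : a ∈ pvU towns roads := hn a (by simp)
    have hrest : ∀ y ∈ rest, y ∈ pvU towns roads := fun y hy => hn y (by simp [hy])
    rw [pvNeis_cons]
    by_cases hc : PySem.Set.contains v a = true
    · rw [if_pos hc]; exact ih hrest v q
    · rw [if_neg hc]
      have ih' := ih hrest (PySem.Set.add v a) (q ++ [a])
      have hfc : ((pvU towns roads).filter (fun z => !(PySem.Set.contains (PySem.Set.add v a) z)))
          = ((pvU towns roads).filter (fun z => (!(PySem.Set.contains v z)) && !(z == a))) := by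
        apply List.filter_congr
        intro z _
        have hcz : PySem.Set.contains (v.add a) z = (PySem.Set.contains v z || z == a) := by
          rw [Bool.eq_iff_iff]
          simp [PySem.Set.contains_iff, PySem.Set.mem_add, beq_iff_eq]
        rw [hcz, Bool.not_or]
      have hdrop : pvUnvis towns roads (PySem.Set.add v a) + 1 ≤ pvUnvis towns roads v := by
        unfold pvUnvis
        rw [hfc]
        exact pv_filter_drop_length _ _ a ha (by
          show (!v.contains a) = true
          rw [Bool.not_eq_true']
          exact Bool.eq_false_iff.mpr hc)
      have hlen : (q ++ [a]).length = q.length + 1 := by simp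
      constructor <;> omega

-- while q: curr = q.popleft(); currSize += 1; <pvNeis over graph[curr]>
def pvBFS (towns : List String) (roads : List (String × String))
    (visited : PySem.Set String) (q : List String) (n : Int) : Int × PySem.Set String :=
  match q with
  | [] => (n, visited)
  | curr :: rest =>
    let s := pvNeis (visited, rest) ((pvBuildGraph towns roads).getD curr [])
    pvBFS towns roads s.1 s.2 (n + 1)
termination_by q.length + 2 * pvUnvis towns roads visited
decreasing_by
  have h := pv_neis_measure towns roads ((pvBuildGraph towns roads).getD curr [])
    (fun y hy => pv_mem_getD_U towns roads curr y hy) visited rest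
  simp only [List.length_cons]
  omega

def roadNetworks (towns : List String) (roads : List (String × String)) : Int :=
  (towns.foldl
    (fun (st : PySem.Set String × Int) town =>
      if PySem.Set.contains st.1 town then st
      else
        let r := pvBFS towns roads (PySem.Set.add st.1 town) [town] 0
        if r.1 > 1 then (r.2, st.2 + 1) else (r.2, st.2))
    (PySem.Set.empty, 0)).2

-- ===== PORT B =====
-- ga = next(g for g in groups if a in g)
def pvFindGroup (gs : List (List String)) (x : String) : Option (List String) :=
  gs.find? (fun g => g.contains x)

-- for t in towns: if not any(t in g for g in groups): groups.append([t])
def pvGroups0 (towns : List String) : List (List String) :=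
  towns.foldl (fun gs t => if gs.any (fun g => g.contains t) then gs else gs ++ [[t]]) []

-- if ga != gb: groups.remove(ga); groups.remove(gb); groups.append(ga + gb)
def pvMergeRoad (gs : List (List String)) (r : String × String) : List (List String) :=
  match pvFindGroup gs r.1, pvFindGroup gs r.2 with
  | some ga, some gb => if ga ≠ gb then ((gs.erase ga).erase gb) ++ [ga ++ gb] else gs
  | _, _ => gs

def roadNetworks_alt (towns : List String) (roads : List (String × String)) : Int :=
  let groups := roads.foldl pvMergeRoad (pvGroups0 towns)
  ((groups.filter (fun g => g.length > 1)).length : Int)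

-- ===== PRECONDITION & SPEC =====
-- Pre_ excludes exactly the inputs where A raises KeyError: a road endpoint that is not a listed town.
def Pre_roadNetworks (towns : List String) (roads : List (String × String)) : Prop :=
  ∀ r ∈ roads, r.1 ∈ towns ∧ r.2 ∈ towns
instance (towns : List String) (roads : List (String × String)) : Decidable (Pre_roadNetworks towns roads) := by
  unfold Pre_roadNetworks; infer_instance

def pvWitness_roadNetworks : List String × (List (String × String)) :=
  (["a", "b", "c"], [("a", "b")])

def Spec_roadNetworks (towns : List String) (roads : List (String × String)) (out : Int) : Prop := out = roadNetworks_alt towns roads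
instance (towns : List String) (roads : List (String × String)) (out : Int) : Decidable (Spec_roadNetworks towns roads out) := by unfold Spec_roadNetworks; infer_instance

-- ===== CLAIM (what is proved, stated in full; the proofs are below) =====
def Claim_equal_roadNetworks : Prop := ∀ (towns : List String) (roads : List (String × String)), Dom_roadNetworks towns roads → Pre_roadNetworks towns roads → Spec_roadNetworks towns roads (roadNetworks towns roads)

-- ===== LEMMAS AND PROOFS =====

-- the undirected edge and reachability relations of the road list
def pvStep (roads : List (String × String)) (x y : String) : Prop := (x, y) ∈ roads ∨ (y, x) ∈ roads
def pvReach (roads : List (String × String)) : String → String → Prop := Relation.ReflTransGen (pvStep roads)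
def pvSame (gs : List (List String)) (x y : String) : Prop := ∃ g ∈ gs, x ∈ g ∧ y ∈ g
def pvInv (towns : List String) (gs : List (List String)) : Prop :=
  (∀ g ∈ gs, g ≠ []) ∧ (∀ g ∈ gs, g.Nodup) ∧
  gs.Pairwise (fun g h => ∀ x, x ∈ g → x ∉ h) ∧
  (∀ x, (∃ g ∈ gs, x ∈ g) ↔ x ∈ towns)

theorem pvStep_symm {roads : List (String × String)} {x y : String} (h : pvStep roads x y) : pvStep roads y x := h.symm

theorem pv_mem_getD_iff (towns : List String) (roads : List (String × String)) (x y : String) :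
    y ∈ (pvBuildGraph towns roads).getD x [] ↔ pvStep roads x y := by
  rw [pv_buildGraph_getD]
  unfold pvStep
  constructor
  · rintro h
    simp only [List.mem_map, List.mem_filter, List.mem_flatMap, beq_iff_eq] at h
    obtain ⟨p, ⟨⟨r, hr, hp⟩, hx⟩, hy⟩ := h
    simp only [List.mem_cons, List.not_mem_nil, or_false] at hp
    rcases hp with rfl | rfl
    · exact Or.inl (by rw [← hx, ← hy]; simpa using hr)
    · exact Or.inr (by rw [← hx, ← hy]; simpa using hr)
  · rintro (h | h)
    · refine List.mem_map.mpr ⟨(x, y), List.mem_filter.mpr ⟨List.mem_flatMap.mpr ⟨(x, y), h, by simp⟩, by simp⟩, rfl⟩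
    · refine List.mem_map.mpr ⟨(x, y), List.mem_filter.mpr ⟨List.mem_flatMap.mpr ⟨(y, x), h, by simp⟩, by simp⟩, rfl⟩

theorem pvNeis_spec (neis : List String) :
    ∀ (v : PySem.Set String) (q : List String),
      (∀ x ∈ q, x ∈ v) → v.Nodup →
      ((pvNeis (v, q) neis).1.Nodup
      ∧ (∀ x ∈ v, x ∈ (pvNeis (v, q) neis).1)
      ∧ (∀ x, x ∈ (pvNeis (v, q) neis).1 ↔ x ∈ v ∨ x ∈ neis)
      ∧ (∀ x ∈ q, x ∈ (pvNeis (v, q) neis).2)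
      ∧ (∀ x ∈ (pvNeis (v, q) neis).2, x ∈ (pvNeis (v, q) neis).1)
      ∧ (∀ x ∈ (pvNeis (v, q) neis).2, x ∈ q ∨ x ∈ neis)
      ∧ (∀ x ∈ (pvNeis (v, q) neis).1, x ∈ v ∨ x ∈ (pvNeis (v, q) neis).2)
      ∧ ((pvNeis (v, q) neis).1.length + q.length = v.length + (pvNeis (v, q) neis).2.length)) := by
  induction neis with
  | nil =>
    intro v q hq hnd
    exact ⟨hnd, fun x h => h, by simp [pvNeis], fun x h => h, hq, fun x h => Or.inl h,
      fun x h => Or.inl h, rfl⟩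
  | cons a rest ih =>
    intro v q hq hnd
    rw [pvNeis_cons]
    by_cases hc : PySem.Set.contains v a = true
    · rw [if_pos hc]
      have hav : a ∈ v := (PySem.Set.contains_iff v a).mp hc
      obtain ⟨n1, n2, n3, n4, n5, n6, n7, n8⟩ := ih v q hq hnd
      refine ⟨n1, n2, ?_, n4, n5, ?_, n7, n8⟩
      · intro x
        rw [n3]
        constructor
        · rintro (h | h)
          · exact Or.inl h
          · exact Or.inr (List.mem_cons_of_mem _ h)
        · rintro (h | h)
          · exact Or.inl h
          · rcases List.mem_cons.mp h with h' | h'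
            · exact Or.inl (h' ▸ hav)
            · exact Or.inr h'
      · intro x hx
        rcases n6 x hx with h | h
        · exact Or.inl h
        · exact Or.inr (List.mem_cons_of_mem _ h)
    · rw [if_neg hc]
      have hav : a ∉ v := fun h => hc ((PySem.Set.contains_iff v a).mpr h)
      have hq' : ∀ x ∈ q ++ [a], x ∈ v.add a := by
        intro x hx
        rcases List.mem_append.mp hx with h | h
        · exact (PySem.Set.mem_add v a x).mpr (Or.inl (hq x h))
        · exact (PySem.Set.mem_add v a x).mpr (Or.inr (List.mem_singleton.mp h))
      obtain ⟨n1, n2, n3, n4, n5, n6, n7, n8⟩ := ih (v.add a) (q ++ [a]) hq' (PySem.Set.nodup_add v a hnd)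
      refine ⟨n1, ?_, ?_, ?_, n5, ?_, ?_, ?_⟩
      · intro x hx
        exact n2 x ((PySem.Set.mem_add v a x).mpr (Or.inl hx))
      · intro x
        rw [n3]
        constructor
        · rintro (h | h)
          · rcases (PySem.Set.mem_add v a x).mp h with h' | h'
            · exact Or.inl h'
            · exact Or.inr (h' ▸ List.mem_cons_self)
          · exact Or.inr (List.mem_cons_of_mem _ h)
        · rintro (h | h)
          · exact Or.inl ((PySem.Set.mem_add v a x).mpr (Or.inl h))
          · rcases List.mem_cons.mp h with h' | h'
            · exact Or.inl ((PySem.Set.mem_add v a x).mpr (Or.inr h'))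
            · exact Or.inr h'
      · intro x hx
        exact n4 x (List.mem_append.mpr (Or.inl hx))
      · intro x hx
        rcases n6 x hx with h | h
        · rcases List.mem_append.mp h with h' | h'
          · exact Or.inl h'
          · exact Or.inr (List.mem_singleton.mp h' ▸ List.mem_cons_self)
        · exact Or.inr (List.mem_cons_of_mem _ h)
      · intro x hx
        rcases n7 x hx with h | h
        · rcases (PySem.Set.mem_add v a x).mp h with h' | h'
          · exact Or.inl h'
          · exact Or.inr (n4 x (List.mem_append.mpr (Or.inr (h' ▸ List.mem_singleton_self a))))
        · exact Or.inr h
      · have hla : (v.add a).length = v.length + 1 := by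
          rw [PySem.Set.add_of_not_mem hav]; simp
        have hlq : (q ++ [a]).length = q.length + 1 := by simp
        omega

-- the one BFS lemma: monotone, nodup, closed, sound, and the size bookkeeping
theorem pvBFS_spec (towns : List String) (roads : List (String × String)) :
    ∀ (visited : PySem.Set String) (q : List String) (n : Int),
      (∀ x ∈ q, x ∈ visited) →
      (∀ x ∈ visited, x ∈ q ∨ ∀ y, pvStep roads x y → y ∈ visited) →
      visited.Nodup →
      (pvBFS towns roads visited q n).2.Nodup
      ∧ (∀ x ∈ visited, x ∈ (pvBFS towns roads visited q n).2)
      ∧ (∀ x ∈ (pvBFS towns roads visited q n).2, ∀ y, pvStep roads x y → y ∈ (pvBFS towns roads visited q n).2)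
      ∧ (∀ x ∈ (pvBFS towns roads visited q n).2, x ∈ visited ∨ ∃ t ∈ q, pvReach roads t x)
      ∧ ((pvBFS towns roads visited q n).1 + (visited.length : Int)
           = n + q.length + ((pvBFS towns roads visited q n).2.length : Int)) := by
  intro visited q n
  induction visited, q, n using pvBFS.induct towns roads with
  | case1 visited n =>
    intro _ hcl hnd
    have h0 : pvBFS towns roads visited [] n = (n, visited) := by rw [pvBFS]
    rw [h0]
    refine ⟨hnd, fun x h => h, ?_, fun x hx => Or.inl hx, by simp⟩
    intro x hx y hstep
    rcases hcl x hx with h | h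
    · simp at h
    · exact h y hstep
  | case2 visited n curr rest _s ih =>
    intro hq hcl hnd
    have hs : _s = pvNeis (visited, rest) ((pvBuildGraph towns roads).getD curr []) := rfl
    rw [hs] at ih
    set neis := (pvBuildGraph towns roads).getD curr [] with hneis
    have hq_rest : ∀ x ∈ rest, x ∈ visited := fun x hx => hq x (List.mem_cons_of_mem _ hx)
    obtain ⟨n1, n2, n3, n4, n5, n6, n7, n8⟩ := pvNeis_spec neis visited rest hq_rest hnd
    have hcurr : curr ∈ visited := hq curr List.mem_cons_self
    have hcl' : ∀ x ∈ (pvNeis (visited, rest) neis).1,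
        x ∈ (pvNeis (visited, rest) neis).2 ∨ ∀ y, pvStep roads x y → y ∈ (pvNeis (visited, rest) neis).1 := by
      intro x hx
      rcases n7 x hx with hv | hs
      · rcases hcl x hv with hq2 | hclosed
        · rcases List.mem_cons.mp hq2 with h' | h'
          · subst h'
            refine Or.inr (fun y hstep => ?_)
            have : y ∈ neis := (pv_mem_getD_iff towns roads x y).mpr hstep
            exact (n3 y).mpr (Or.inr this)
          · exact Or.inl (n4 x h')
        · exact Or.inr (fun y hstep => n2 y (hclosed y hstep))
      · exact Or.inl hs
    obtain ⟨b1, b2, b3, b4, b5⟩ := ih n5 hcl' n1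
    have hstep : pvBFS towns roads visited (curr :: rest) n
        = pvBFS towns roads (pvNeis (visited, rest) neis).1 (pvNeis (visited, rest) neis).2 (n + 1) := by
      rw [pvBFS]
    rw [hstep]
    refine ⟨b1, ?_, b3, ?_, ?_⟩
    · intro x hx
      exact b2 x (n2 x hx)
    · intro x hx
      rcases b4 x hx with h | ⟨t, ht, hr⟩
      · rcases (n3 x).mp h with h' | h'
        · exact Or.inl h'
        · exact Or.inr ⟨curr, List.mem_cons_self,
            Relation.ReflTransGen.single ((pv_mem_getD_iff towns roads curr x).mp h')⟩
      · rcases n6 t ht with h' | h'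
        · exact Or.inr ⟨t, List.mem_cons_of_mem _ h', hr⟩
        · exact Or.inr ⟨curr, List.mem_cons_self,
            Relation.ReflTransGen.trans
              (Relation.ReflTransGen.single ((pv_mem_getD_iff towns roads curr t).mp h')) hr⟩
    · have := n8
      simp only [List.length_cons]
      push_cast
      push_cast at b5
      omega

theorem pvBFS_mem_iff (towns : List String) (roads : List (String × String))
    (visited : PySem.Set String) (q : List String) (n : Int)
    (hq : ∀ x ∈ q, x ∈ visited)
    (hcl : ∀ x ∈ visited, x ∈ q ∨ ∀ y, pvStep roads x y → y ∈ visited)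
    (hnd : visited.Nodup) :
    ∀ x, x ∈ (pvBFS towns roads visited q n).2 ↔ x ∈ visited ∨ ∃ t ∈ q, pvReach roads t x := by
  obtain ⟨b1, b2, b3, b4, b5⟩ := pvBFS_spec towns roads visited q n hq hcl hnd
  intro x
  constructor
  · exact b4 x
  · rintro (h | ⟨t, ht, hr⟩)
    · exact b2 x h
    · have htv : t ∈ (pvBFS towns roads visited q n).2 := b2 t (hq t ht)
      clear b4 b5
      induction hr with
      | refl => exact htv
      | tail _ hbc ihr => exact b3 _ ihr _ hbc

-- ---- partition lemmas ----

theorem pvCell_unique {gs : List (List String)} (hp : gs.Pairwise (fun g h => ∀ x, x ∈ g → x ∉ h))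
    {g1 g2 : List String} (h1 : g1 ∈ gs) (h2 : g2 ∈ gs) {y : String} (hy1 : y ∈ g1) (hy2 : y ∈ g2) :
    g1 = g2 := by
  induction gs with
  | nil => cases h1
  | cons g t ih =>
    rcases List.pairwise_cons.mp hp with ⟨hd, ht⟩
    rcases List.mem_cons.mp h1 with rfl | h1' <;> rcases List.mem_cons.mp h2 with h2a | h2'
    · exact h2a.symm
    · exact absurd hy2 (hd _ h2' y hy1)
    · exact absurd hy1 (hd _ h1' y (h2a ▸ hy2))
    · exact ih ht h1' h2'

-- cells of an invariant partition are distinct, and two distinct cells are disjoint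
theorem pvCells_nodup {towns : List String} {gs : List (List String)} (h : pvInv towns gs) : gs.Nodup := by
  obtain ⟨hne, -, hp, -⟩ := h
  refine List.Pairwise.imp_of_mem ?_ hp
  intro g1 g2 hg1 _ hD heq
  rcases List.exists_mem_of_ne_nil g1 (hne g1 hg1) with ⟨x, hx⟩
  exact hD x hx (heq ▸ hx)

theorem pvCells_disj {towns : List String} {gs : List (List String)} (h : pvInv towns gs)
    {g1 g2 : List String} (h1 : g1 ∈ gs) (h2 : g2 ∈ gs) (hne : g1 ≠ g2) :
    ∀ x, x ∈ g1 → x ∉ g2 := by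
  intro x hx1 hx2
  exact hne (pvCell_unique h.2.2.1 h1 h2 hx1 hx2)

-- find? facts
theorem pvFindGroup_some {gs : List (List String)} {x : String} {g : List String}
    (h : pvFindGroup gs x = some g) : g ∈ gs ∧ x ∈ g := by
  refine ⟨List.mem_of_find?_eq_some h, ?_⟩
  have := List.find?_some h
  simpa using this

theorem pvFindGroup_of_mem {gs : List (List String)} {x : String} {g : List String}
    (hg : g ∈ gs) (hx : x ∈ g) : ∃ g', pvFindGroup gs x = some g' := by
  cases hfind : pvFindGroup gs x with
  | some g' => exact ⟨g', rfl⟩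
  | none =>
    exfalso
    have := List.find?_eq_none.mp hfind g hg
    simp at this
    exact this hx

-- membership in the merged list
theorem pvMerge_mem {towns : List String} {gs : List (List String)} (h : pvInv towns gs)
    {ga gb : List String} (hga : ga ∈ gs) (hgb : gb ∈ gs) (hne : ga ≠ gb) :
    ∀ g, g ∈ ((gs.erase ga).erase gb) ++ [ga ++ gb] ↔ (g ∈ gs ∧ g ≠ ga ∧ g ≠ gb) ∨ g = ga ++ gb := by
  have hnd : gs.Nodup := pvCells_nodup h
  intro g
  rw [List.mem_append, List.mem_singleton]
  constructor
  · rintro (hg | hg)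
    · left
      have h1 := (List.Nodup.mem_erase_iff (hnd.erase ga)).mp hg
      have h2 := (List.Nodup.mem_erase_iff hnd).mp h1.2
      exact ⟨h2.2, h2.1, h1.1⟩
    · exact Or.inr hg
  · rintro (⟨hg, hga', hgb'⟩ | hg)
    · exact Or.inl ((List.Nodup.mem_erase_iff (hnd.erase ga)).mpr
        ⟨hgb', (List.Nodup.mem_erase_iff hnd).mpr ⟨hga', hg⟩⟩)
    · exact Or.inr hg

def pvG0step (gs : List (List String)) (t : String) : List (List String) :=
  if gs.any (fun g => g.contains t) then gs else gs ++ [[t]]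

theorem pvGroups0_aux (ts : List String) :
    ∀ gs : List (List String),
      (∀ g ∈ gs, g ≠ []) → (∀ g ∈ gs, g.Nodup) →
      gs.Pairwise (fun g h => ∀ x, x ∈ g → x ∉ h) →
      ((∀ g ∈ ts.foldl pvG0step gs, g ≠ [])
      ∧ (∀ g ∈ ts.foldl pvG0step gs, g.Nodup)
      ∧ (ts.foldl pvG0step gs).Pairwise (fun g h => ∀ x, x ∈ g → x ∉ h)
      ∧ (∀ x, (∃ g ∈ ts.foldl pvG0step gs, x ∈ g) ↔ (∃ g ∈ gs, x ∈ g) ∨ x ∈ ts)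
      ∧ (∀ g ∈ ts.foldl pvG0step gs, g ∈ gs ∨ ∃ t, g = [t])) := by
  induction ts with
  | nil =>
    intro gs h1 h2 h3
    exact ⟨h1, h2, h3, by simp, fun g hg => Or.inl hg⟩
  | cons t ts' ih =>
    intro gs h1 h2 h3
    simp only [List.foldl_cons]
    by_cases hany : gs.any (fun g => g.contains t) = true
    · rw [show pvG0step gs t = gs from by unfold pvG0step; rw [if_pos hany]]
      obtain ⟨c1, c2, c3, c4, c5⟩ := ih gs h1 h2 h3
      refine ⟨c1, c2, c3, ?_, c5⟩
      intro x
      rw [c4]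
      have hcov : ∃ g ∈ gs, t ∈ g := by
        obtain ⟨g, hg, hc⟩ := List.any_eq_true.mp hany
        exact ⟨g, hg, by simpa using hc⟩
      constructor
      · rintro (h | h)
        · exact Or.inl h
        · exact Or.inr (List.mem_cons_of_mem _ h)
      · rintro (h | h)
        · exact Or.inl h
        · rcases List.mem_cons.mp h with rfl | h'
          · exact Or.inl hcov
          · exact Or.inr h'
    · rw [show pvG0step gs t = gs ++ [[t]] from by unfold pvG0step; rw [if_neg hany]]
      have hnotin : ∀ g ∈ gs, t ∉ g := by
        intro g hg ht
        exact hany (List.any_eq_true.mpr ⟨g, hg, by simpa using ht⟩)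
      have h1' : ∀ g ∈ gs ++ [[t]], g ≠ [] := by
        intro g hg
        rcases List.mem_append.mp hg with h | h
        · exact h1 g h
        · simp at h; simp [h]
      have h2' : ∀ g ∈ gs ++ [[t]], g.Nodup := by
        intro g hg
        rcases List.mem_append.mp hg with h | h
        · exact h2 g h
        · simp at h; simp [h]
      have h3' : (gs ++ [[t]]).Pairwise (fun g h => ∀ x, x ∈ g → x ∉ h) := by
        rw [List.pairwise_append]
        refine ⟨h3, by simp, ?_⟩
        intro g hg g' hg' x hxg
        rw [List.mem_singleton.mp hg']
        intro hx
        exact hnotin g hg (List.mem_singleton.mp hx ▸ hxg)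
      obtain ⟨c1, c2, c3, c4, c5⟩ := ih (gs ++ [[t]]) h1' h2' h3'
      refine ⟨c1, c2, c3, ?_, ?_⟩
      · intro x
        rw [c4]
        constructor
        · rintro (⟨g, hg, hx⟩ | h)
          · rcases List.mem_append.mp hg with h' | h'
            · exact Or.inl ⟨g, h', hx⟩
            · simp at h'
              subst h'
              rw [List.mem_singleton.mp hx]
              exact Or.inr List.mem_cons_self
          · exact Or.inr (List.mem_cons_of_mem _ h)
        · rintro (⟨g, hg, hx⟩ | h)
          · exact Or.inl ⟨g, List.mem_append.mpr (Or.inl hg), hx⟩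
          · rcases List.mem_cons.mp h with rfl | h'
            · exact Or.inl ⟨[x], List.mem_append.mpr (Or.inr (by simp)), by simp⟩
            · exact Or.inr h'
      · intro g hg
        rcases c5 g hg with h | h
        · rcases List.mem_append.mp h with h' | h'
          · exact Or.inl h'
          · simp at h'
            exact Or.inr ⟨t, h'⟩
        · exact Or.inr h

theorem pvGroups0_inv (towns : List String) : pvInv towns (pvGroups0 towns) := by
  obtain ⟨c1, c2, c3, c4, _⟩ := pvGroups0_aux towns [] (by simp) (by simp) (by simp)
  have heq : pvGroups0 towns = towns.foldl pvG0step [] := rfl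
  rw [pvInv, heq]
  refine ⟨c1, c2, c3, ?_⟩
  intro x
  rw [c4]
  simp

theorem pvGroups0_singletons (towns : List String) :
    ∀ g ∈ pvGroups0 towns, ∃ t, g = [t] := by
  obtain ⟨_, _, _, _, c5⟩ := pvGroups0_aux towns [] (by simp) (by simp) (by simp)
  intro g hg
  rcases c5 g hg with h | h
  · simp at h
  · exact h

theorem pvMergeRoad_inv {towns : List String} {gs : List (List String)} (h : pvInv towns gs)
    (r : String × String) : pvInv towns (pvMergeRoad gs r) := by
  unfold pvMergeRoad
  cases hfa : pvFindGroup gs r.1 with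
  | none => exact h
  | some ga =>
    cases hfb : pvFindGroup gs r.2 with
    | none => exact h
    | some gb =>
      show pvInv towns (if ga ≠ gb then ((gs.erase ga).erase gb) ++ [ga ++ gb] else gs)
      by_cases hne : ga ≠ gb
      · rw [if_pos hne]
        obtain ⟨hga, ha⟩ := pvFindGroup_some hfa
        obtain ⟨hgb, hb⟩ := pvFindGroup_some hfb
        have hmem := pvMerge_mem h hga hgb hne
        obtain ⟨h1, h2, h3, h4⟩ := h
        have hdisj := pvCells_disj ⟨h1, h2, h3, h4⟩ hga hgb hne
        refine ⟨?_, ?_, ?_, ?_⟩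
        · intro g hg
          rcases (hmem g).mp hg with ⟨hgs, -, -⟩ | rfl
          · exact h1 g hgs
          · simp [h1 ga hga]
        · intro g hg
          rcases (hmem g).mp hg with ⟨hgs, -, -⟩ | rfl
          · exact h2 g hgs
          · exact List.Nodup.append (h2 ga hga) (h2 gb hgb) (fun x hx => hdisj x hx)
        · rw [List.pairwise_append]
          have hnd : gs.Nodup := pvCells_nodup ⟨h1, h2, h3, h4⟩
          have hsub : ((gs.erase ga).erase gb) ⊆ gs := by
            intro g hg
            exact List.erase_subset (List.erase_subset hg)
          have hsubE : ∀ g ∈ (gs.erase ga).erase gb, g ∈ gs ∧ g ≠ ga ∧ g ≠ gb := by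
            intro g hg
            have h1' := (List.Nodup.mem_erase_iff (hnd.erase ga)).mp hg
            have h2' := (List.Nodup.mem_erase_iff hnd).mp h1'.2
            exact ⟨h2'.2, h2'.1, h1'.1⟩
          refine ⟨?_, by simp, ?_⟩
          · exact h3.sublist ((List.erase_sublist).trans (List.erase_sublist))
          · intro g hg g' hg' x hxg
            rw [List.mem_singleton.mp hg']
            obtain ⟨hgs, hne1, hne2⟩ := hsubE g hg
            intro hx
            rcases List.mem_append.mp hx with h' | h'
            · exact pvCells_disj ⟨h1, h2, h3, h4⟩ hgs hga hne1 x hxg h'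
            · exact pvCells_disj ⟨h1, h2, h3, h4⟩ hgs hgb hne2 x hxg h'
        · intro x
          rw [← h4 x]
          constructor
          · rintro ⟨g, hg, hx⟩
            rcases (hmem g).mp hg with ⟨hgs, -, -⟩ | rfl
            · exact ⟨g, hgs, hx⟩
            · rcases List.mem_append.mp hx with h' | h'
              · exact ⟨ga, hga, h'⟩
              · exact ⟨gb, hgb, h'⟩
          · rintro ⟨g, hg, hx⟩
            by_cases hga' : g = ga
            · exact ⟨ga ++ gb, (hmem _).mpr (Or.inr rfl), List.mem_append.mpr (Or.inl (hga' ▸ hx))⟩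
            · by_cases hgb' : g = gb
              · exact ⟨ga ++ gb, (hmem _).mpr (Or.inr rfl), List.mem_append.mpr (Or.inr (hgb' ▸ hx))⟩
              · exact ⟨g, (hmem _).mpr (Or.inl ⟨hg, hga', hgb'⟩), hx⟩
      · rw [if_neg hne]
        exact h

theorem pvMergeRoad_mono {towns : List String} {gs : List (List String)} (h : pvInv towns gs)
    (r : String × String) {x y : String} (hs : pvSame gs x y) : pvSame (pvMergeRoad gs r) x y := by
  obtain ⟨g, hg, hx, hy⟩ := hs
  unfold pvMergeRoad
  cases hfa : pvFindGroup gs r.1 with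
  | none => exact ⟨g, hg, hx, hy⟩
  | some ga =>
    cases hfb : pvFindGroup gs r.2 with
    | none => exact ⟨g, hg, hx, hy⟩
    | some gb =>
      show pvSame (if ga ≠ gb then ((gs.erase ga).erase gb) ++ [ga ++ gb] else gs) x y
      by_cases hne : ga ≠ gb
      · rw [if_pos hne]
        obtain ⟨hga, -⟩ := pvFindGroup_some hfa
        obtain ⟨hgb, -⟩ := pvFindGroup_some hfb
        have hmem := pvMerge_mem h hga hgb hne
        by_cases hga' : g = ga
        · exact ⟨ga ++ gb, (hmem _).mpr (Or.inr rfl),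
            List.mem_append.mpr (Or.inl (hga' ▸ hx)), List.mem_append.mpr (Or.inl (hga' ▸ hy))⟩
        · by_cases hgb' : g = gb
          · exact ⟨ga ++ gb, (hmem _).mpr (Or.inr rfl),
              List.mem_append.mpr (Or.inr (hgb' ▸ hx)), List.mem_append.mpr (Or.inr (hgb' ▸ hy))⟩
          · exact ⟨g, (hmem _).mpr (Or.inl ⟨hg, hga', hgb'⟩), hx, hy⟩
      · rw [if_neg hne]
        exact ⟨g, hg, hx, hy⟩

theorem pvMergeRoad_sound {towns : List String} {roads : List (String × String)}
    {gs : List (List String)} (h : pvInv towns gs)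
    {r : String × String} (hr : r ∈ roads)
    (hsnd : ∀ g ∈ gs, ∀ x ∈ g, ∀ y ∈ g, pvReach roads x y) :
    ∀ g ∈ pvMergeRoad gs r, ∀ x ∈ g, ∀ y ∈ g, pvReach roads x y := by
  unfold pvMergeRoad
  cases hfa : pvFindGroup gs r.1 with
  | none => exact hsnd
  | some ga =>
    cases hfb : pvFindGroup gs r.2 with
    | none => exact hsnd
    | some gb =>
      show ∀ g ∈ (if ga ≠ gb then ((gs.erase ga).erase gb) ++ [ga ++ gb] else gs), ∀ x ∈ g, ∀ y ∈ g, pvReach roads x y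
      by_cases hne : ga ≠ gb
      · rw [if_pos hne]
        obtain ⟨hga, ha⟩ := pvFindGroup_some hfa
        obtain ⟨hgb, hb⟩ := pvFindGroup_some hfb
        have hmem := pvMerge_mem h hga hgb hne
        intro g hg x hx y hy
        rcases (hmem g).mp hg with ⟨hgs, -, -⟩ | rfl
        · exact hsnd g hgs x hx y hy
        · have hstep : pvStep roads r.1 r.2 := Or.inl (by simpa using hr)
          rcases List.mem_append.mp hx with hxa | hxb <;> rcases List.mem_append.mp hy with hya | hyb
          · exact hsnd ga hga x hxa y hya
          · exact Relation.ReflTransGen.trans (hsnd ga hga x hxa r.1 ha)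
              (Relation.ReflTransGen.trans (Relation.ReflTransGen.single hstep) (hsnd gb hgb r.2 hb y hyb))
          · exact Relation.ReflTransGen.trans (hsnd gb hgb x hxb r.2 hb)
              (Relation.ReflTransGen.trans (Relation.ReflTransGen.single (pvStep_symm hstep)) (hsnd ga hga r.1 ha y hya))
          · exact hsnd gb hgb x hxb y hyb
      · rw [if_neg hne]
        exact hsnd

theorem pvMergeRoad_joins {towns : List String} {gs : List (List String)} (h : pvInv towns gs)
    (r : String × String) (h1 : r.1 ∈ towns) (h2 : r.2 ∈ towns) :
    pvSame (pvMergeRoad gs r) r.1 r.2 := by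
  have hcov := h.2.2.2
  obtain ⟨ga0, hga0, ha0⟩ := (hcov r.1).mpr h1
  obtain ⟨gb0, hgb0, hb0⟩ := (hcov r.2).mpr h2
  obtain ⟨ga, hfa⟩ := pvFindGroup_of_mem hga0 ha0
  obtain ⟨gb, hfb⟩ := pvFindGroup_of_mem hgb0 hb0
  obtain ⟨hga, ha⟩ := pvFindGroup_some hfa
  obtain ⟨hgb, hb⟩ := pvFindGroup_some hfb
  unfold pvMergeRoad
  rw [hfa, hfb]
  show pvSame (if ga ≠ gb then ((gs.erase ga).erase gb) ++ [ga ++ gb] else gs) r.1 r.2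
  by_cases hne : ga ≠ gb
  · rw [if_pos hne]
    have hmem := pvMerge_mem h hga hgb hne
    exact ⟨ga ++ gb, (hmem _).mpr (Or.inr rfl),
      List.mem_append.mpr (Or.inl ha), List.mem_append.mpr (Or.inr hb)⟩
  · rw [if_neg hne]
    rw [not_not] at hne
    exact ⟨ga, hga, ha, hne ▸ hb⟩

def pvGroupsF (towns : List String) (roads : List (String × String)) : List (List String) :=
  roads.foldl pvMergeRoad (pvGroups0 towns)

theorem pvGroupsF_inv (towns : List String) (roads : List (String × String)) :
    pvInv towns (pvGroupsF towns roads) := by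
  have : ∀ (rs : List (String × String)) (gs : List (List String)),
      pvInv towns gs → pvInv towns (rs.foldl pvMergeRoad gs) := by
    intro rs
    induction rs with
    | nil => intro gs h; exact h
    | cons r rest ih => intro gs h; exact ih _ (pvMergeRoad_inv h r)
  exact this roads _ (pvGroups0_inv towns)

theorem pvGroupsF_sound (towns : List String) (roads : List (String × String)) :
    ∀ g ∈ pvGroupsF towns roads, ∀ x ∈ g, ∀ y ∈ g, pvReach roads x y := by
  have key : ∀ (rs : List (String × String)), (∀ r ∈ rs, r ∈ roads) →
      ∀ (gs : List (List String)), pvInv towns gs →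
      (∀ g ∈ gs, ∀ x ∈ g, ∀ y ∈ g, pvReach roads x y) →
      ∀ g ∈ rs.foldl pvMergeRoad gs, ∀ x ∈ g, ∀ y ∈ g, pvReach roads x y := by
    intro rs
    induction rs with
    | nil => intro _ gs _ hsnd; exact hsnd
    | cons r rest ih =>
      intro hsub gs hinv hsnd
      exact ih (fun r' hr' => hsub r' (List.mem_cons_of_mem _ hr'))
        _ (pvMergeRoad_inv hinv r)
        (pvMergeRoad_sound hinv (hsub r List.mem_cons_self) hsnd)
  refine key roads (fun r hr => hr) _ (pvGroups0_inv towns) ?_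
  intro g hg x hx y hy
  obtain ⟨t, rfl⟩ := pvGroups0_singletons towns g hg
  simp at hx hy
  rw [hx, hy]
  exact Relation.ReflTransGen.refl

theorem pvGroupsF_joins (towns : List String) (roads : List (String × String))
    (hpre : Pre_roadNetworks towns roads) :
    ∀ r ∈ roads, pvSame (pvGroupsF towns roads) r.1 r.2 := by
  have hmono : ∀ (rs : List (String × String)) (gs : List (List String)), pvInv towns gs →
      ∀ x y, pvSame gs x y → pvSame (rs.foldl pvMergeRoad gs) x y := by
    intro rs
    induction rs with
    | nil => intro gs _ x y h; exact h
    | cons r rest ih =>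
      intro gs hinv x y h
      exact ih _ (pvMergeRoad_inv hinv r) x y (pvMergeRoad_mono hinv r h)
  have key : ∀ (rs : List (String × String)), (∀ r ∈ rs, r.1 ∈ towns ∧ r.2 ∈ towns) →
      ∀ (gs : List (List String)), pvInv towns gs →
      ∀ r ∈ rs, pvSame (rs.foldl pvMergeRoad gs) r.1 r.2 := by
    intro rs
    induction rs with
    | nil => intro _ gs _ r hr; cases hr
    | cons r0 rest ih =>
      intro hsub gs hinv r hr
      rcases List.mem_cons.mp hr with rfl | hr'
      · simp only [List.foldl_cons]
        exact hmono rest _ (pvMergeRoad_inv hinv r)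
          r.1 r.2 (pvMergeRoad_joins hinv r (hsub r hr).1 (hsub r hr).2)
      · simp only [List.foldl_cons]
        exact ih (fun r' h' => hsub r' (List.mem_cons_of_mem _ h')) _ (pvMergeRoad_inv hinv r0) r hr'
  exact key roads (fun r hr => hpre r hr) _ (pvGroups0_inv towns)

theorem pvSame_trans {towns : List String} {gs : List (List String)} (h : pvInv towns gs)
    {x y z : String} (hxy : pvSame gs x y) (hyz : pvSame gs y z) : pvSame gs x z := by
  obtain ⟨g1, hg1, hx, hy1⟩ := hxy
  obtain ⟨g2, hg2, hy2, hz⟩ := hyz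
  have : g1 = g2 := pvCell_unique h.2.2.1 hg1 hg2 hy1 hy2
  exact ⟨g1, hg1, hx, this ▸ hz⟩

theorem pvGroupsF_complete (towns : List String) (roads : List (String × String))
    (hpre : Pre_roadNetworks towns roads) {x y : String}
    (hx : x ∈ towns) (hr : pvReach roads x y) : pvSame (pvGroupsF towns roads) x y := by
  have hinv := pvGroupsF_inv towns roads
  induction hr with
  | refl =>
    obtain ⟨g, hg, hxg⟩ := (hinv.2.2.2 x).mpr hx
    exact ⟨g, hg, hxg, hxg⟩
  | tail hab hbc ih =>
    rename_i b c
    have hsame : pvSame (pvGroupsF towns roads) b c := by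
      rcases hbc with h' | h'
      · exact pvGroupsF_joins towns roads hpre (b, c) h'
      · obtain ⟨g, hg, h1, h2⟩ := pvGroupsF_joins towns roads hpre (c, b) h'
        exact ⟨g, hg, h2, h1⟩
    exact pvSame_trans hinv ih hsame

-- counting helper: flipping the predicate on the unique occurrence of one cell
theorem pv_filter_flip {α : Type} [DecidableEq α] {D : α → α → Prop} {l : List α} (hp : l.Pairwise D)
    {g : α} (hg : g ∈ l) (hgD : ¬ D g g) (p p' : α → Bool)
    (hagree : ∀ h ∈ l, h ≠ g → p' h = p h) (hpg : p g = false) (hp'g : p' g = true) :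
    (l.filter p').length = (l.filter p).length + 1 := by
  induction l with
  | nil => cases hg
  | cons a t ih =>
    rcases List.pairwise_cons.mp hp with ⟨hd, ht⟩
    simp only [List.filter_cons]
    by_cases hag : a = g
    · subst hag
      rw [if_pos hp'g, if_neg (by simp [hpg])]
      have hgt : a ∉ t := fun hmem => hgD (hd a hmem)
      have heq : t.filter p' = t.filter p := by
        apply List.filter_congr
        intro b hb
        exact hagree b (List.mem_cons_of_mem _ hb) (fun hbg => hgt (hbg ▸ hb))
      rw [heq]
      simp
    · have hgt : g ∈ t := (List.mem_cons.mp hg).resolve_left (fun h => hag h.symm)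
      have hpa : p' a = p a := hagree a List.mem_cons_self hag
      rw [hpa]
      by_cases hc : p a = true
      · rw [if_pos hc, if_pos hc]
        simp only [List.length_cons]
        rw [ih ht hgt (fun b hb hbg => hagree b (List.mem_cons_of_mem _ hb) hbg)]
      · rw [if_neg hc, if_neg hc]
        exact ih ht hgt (fun b hb hbg => hagree b (List.mem_cons_of_mem _ hb) hbg)

-- A's outer-loop body, named for the induction (definitionally equal to the foldl body of roadNetworks)
def pvAStep (towns : List String) (roads : List (String × String))
    (st : PySem.Set String × Int) (town : String) : PySem.Set String × Int :=
  if PySem.Set.contains st.1 town then st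
  else
    let r := pvBFS towns roads (PySem.Set.add st.1 town) [town] 0
    if r.1 > 1 then (r.2, st.2 + 1) else (r.2, st.2)

-- the counting predicate: cells already touched by the processed prefix and of size > 1
def pvCnt (pref : List String) (g : List String) : Bool :=
  decide (∃ u ∈ g, u ∈ pref) && decide (g.length > 1)

theorem pvOuter (towns : List String) (roads : List (String × String))
    (hpre : Pre_roadNetworks towns roads) :
    ∀ (rest pref : List String), towns = pref ++ rest →
    ∀ (st : PySem.Set String × Int),
      st.1.Nodup →
      (∀ x, x ∈ st.1 ↔ ∃ u ∈ pref, pvReach roads u x) →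
      st.2 = (((pvGroupsF towns roads).filter (pvCnt pref)).length : Int) →
      ((rest.foldl (pvAStep towns roads) st).1.Nodup
      ∧ (∀ x, x ∈ (rest.foldl (pvAStep towns roads) st).1 ↔ ∃ u ∈ pref ++ rest, pvReach roads u x)
      ∧ (rest.foldl (pvAStep towns roads) st).2
          = (((pvGroupsF towns roads).filter (pvCnt (pref ++ rest))).length : Int)) := by
  have hinv := pvGroupsF_inv towns roads
  intro rest
  induction rest with
  | nil =>
    intro pref htowns st h1 h2 h3
    simpa using ⟨h1, h2, h3⟩
  | cons t rest' ih =>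
    intro pref htowns st hnd hmem hcnt
    have htowns' : towns = (pref ++ [t]) ++ rest' := by simpa using htowns
    have hpref_sub : ∀ u ∈ pref, u ∈ towns := by
      intro u hu; rw [htowns]; exact List.mem_append.mpr (Or.inl hu)
    have ht_towns : t ∈ towns := by
      rw [htowns]; exact List.mem_append.mpr (Or.inr List.mem_cons_self)
    simp only [List.foldl_cons]
    have hstep : (pvAStep towns roads st t).1.Nodup
        ∧ (∀ x, x ∈ (pvAStep towns roads st t).1 ↔ ∃ u ∈ pref ++ [t], pvReach roads u x)
        ∧ (pvAStep towns roads st t).2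
            = (((pvGroupsF towns roads).filter (pvCnt (pref ++ [t]))).length : Int) := by
      unfold pvAStep
      by_cases hc : PySem.Set.contains st.1 t = true
      · rw [if_pos hc]
        have htv : t ∈ st.1 := (PySem.Set.contains_iff st.1 t).mp hc
        obtain ⟨u0, hu0, hru0⟩ := (hmem t).mp htv
        refine ⟨hnd, ?_, ?_⟩
        · intro x
          rw [hmem x]
          constructor
          · rintro ⟨u, hu, hru⟩
            exact ⟨u, List.mem_append.mpr (Or.inl hu), hru⟩
          · rintro ⟨u, hu, hru⟩
            rcases List.mem_append.mp hu with h' | h'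
            · exact ⟨u, h', hru⟩
            · rw [List.mem_singleton.mp h'] at hru
              exact ⟨u0, hu0, Relation.ReflTransGen.trans hru0 hru⟩
        · rw [hcnt]
          congr 2
          apply List.filter_congr
          intro g hg
          unfold pvCnt
          congr 1
          rw [decide_eq_decide]
          constructor
          · rintro ⟨u, hu, hup⟩
            exact ⟨u, hu, List.mem_append.mpr (Or.inl hup)⟩
          · rintro ⟨u, hu, hup⟩
            rcases List.mem_append.mp hup with h' | h'
            · exact ⟨u, hu, h'⟩
            · rw [List.mem_singleton.mp h'] at hu
              have hsame := pvGroupsF_complete towns roads hpre (hpref_sub u0 hu0) hru0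
              obtain ⟨g', hg', hu0g', htg'⟩ := hsame
              have : g' = g := pvCell_unique hinv.2.2.1 hg' hg htg' hu
              exact ⟨u0, this ▸ hu0g', hu0⟩
      · rw [if_neg hc]
        have htv : t ∉ st.1 := fun h => hc ((PySem.Set.contains_iff st.1 t).mpr h)
        have hq : ∀ x ∈ [t], x ∈ st.1.add t := by
          intro x hx
          rw [List.mem_singleton.mp hx]
          exact (PySem.Set.mem_add st.1 t t).mpr (Or.inr rfl)
        have hcl : ∀ x ∈ st.1.add t, x ∈ [t] ∨ ∀ y, pvStep roads x y → y ∈ st.1.add t := by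
          intro x hx
          rcases (PySem.Set.mem_add st.1 t x).mp hx with h' | h'
          · refine Or.inr (fun y hstep => ?_)
            obtain ⟨u, hu, hru⟩ := (hmem x).mp h'
            have : y ∈ st.1 := (hmem y).mpr ⟨u, hu, Relation.ReflTransGen.tail hru hstep⟩
            exact (PySem.Set.mem_add st.1 t y).mpr (Or.inl this)
          · exact Or.inl (by simp [h'])
        have hnd' : (st.1.add t).Nodup := PySem.Set.nodup_add st.1 t hnd
        obtain ⟨b1, b2, b3, b4, b5⟩ := pvBFS_spec towns roads (st.1.add t) [t] 0 hq hcl hnd'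
        have hmemr := pvBFS_mem_iff towns roads (st.1.add t) [t] 0 hq hcl hnd'
        have hmem2 : ∀ x, x ∈ (pvBFS towns roads (st.1.add t) [t] 0).2 ↔ (x ∈ st.1 ∨ pvReach roads t x) := by
          intro x
          rw [hmemr x]
          constructor
          · rintro (h' | ⟨t', ht', hr'⟩)
            · rcases (PySem.Set.mem_add st.1 t x).mp h' with h'' | h''
              · exact Or.inl h''
              · exact Or.inr (h'' ▸ Relation.ReflTransGen.refl)
            · rw [List.mem_singleton.mp ht'] at hr'
              exact Or.inr hr'
          · rintro (h' | h')
            · exact Or.inl ((PySem.Set.mem_add st.1 t x).mpr (Or.inl h'))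
            · exact Or.inr ⟨t, List.mem_singleton_self t, h'⟩
        obtain ⟨gt, hgt, htgt⟩ := (hinv.2.2.2 t).mpr ht_towns
        have hreach_iff : ∀ x, pvReach roads t x ↔ x ∈ gt := by
          intro x
          constructor
          · intro h'
            obtain ⟨g', hg', htg', hxg'⟩ := pvGroupsF_complete towns roads hpre ht_towns h'
            exact pvCell_unique hinv.2.2.1 hg' hgt htg' htgt ▸ hxg'
          · intro h'
            exact pvGroupsF_sound towns roads gt hgt t htgt x h'
        have hdisj : ∀ x, x ∈ st.1 → x ∉ gt := by
          intro x hx hxgt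
          obtain ⟨u, hu, hru⟩ := (hmem x).mp hx
          have : pvReach roads x t := pvGroupsF_sound towns roads gt hgt x hxgt t htgt
          exact htv ((hmem t).mpr ⟨u, hu, Relation.ReflTransGen.trans hru this⟩)
        have hndapp : (st.1 ++ gt).Nodup := by
          rw [List.nodup_append]
          refine ⟨hnd, hinv.2.1 gt hgt, ?_⟩
          intro x hx y hy hxy
          exact hdisj x hx (hxy ▸ hy)
        have hperm : (pvBFS towns roads (st.1.add t) [t] 0).2.Perm (st.1 ++ gt) := by
          rw [List.perm_ext_iff_of_nodup b1 hndapp]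
          intro x
          rw [hmem2 x, List.mem_append]
          constructor
          · rintro (h' | h')
            · exact Or.inl h'
            · exact Or.inr ((hreach_iff x).mp h')
          · rintro (h' | h')
            · exact Or.inl h'
            · exact Or.inr ((hreach_iff x).mpr h')
        have hlen : (pvBFS towns roads (st.1.add t) [t] 0).2.length = st.1.length + gt.length := by
          rw [hperm.length_eq, List.length_append]
        have hlenadd : (st.1.add t).length = st.1.length + 1 := by
          rw [PySem.Set.add_of_not_mem htv]; simp
        have hval : (pvBFS towns roads (st.1.add t) [t] 0).1 = (gt.length : Int) := by
          rw [hlenadd, hlen] at b5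
          push_cast at b5 ⊢
          simp only [List.length_singleton] at b5
          omega
        have hmemnew : ∀ x, x ∈ (pvBFS towns roads (st.1.add t) [t] 0).2
            ↔ ∃ u ∈ pref ++ [t], pvReach roads u x := by
          intro x
          rw [hmem2 x]
          constructor
          · rintro (h' | h')
            · obtain ⟨u, hu, hru⟩ := (hmem x).mp h'
              exact ⟨u, List.mem_append.mpr (Or.inl hu), hru⟩
            · exact ⟨t, List.mem_append.mpr (Or.inr (List.mem_singleton_self t)), h'⟩
          · rintro ⟨u, hu, hru⟩
            rcases List.mem_append.mp hu with h' | h'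
            · exact Or.inl ((hmem x).mpr ⟨u, h', hru⟩)
            · rw [List.mem_singleton.mp h'] at hru
              exact Or.inr hru
        have hagree : ∀ g ∈ pvGroupsF towns roads, g ≠ gt → pvCnt (pref ++ [t]) g = pvCnt pref g := by
          intro g hg hne
          unfold pvCnt
          congr 1
          rw [decide_eq_decide]
          constructor
          · rintro ⟨u, hu, hup⟩
            rcases List.mem_append.mp hup with h' | h'
            · exact ⟨u, hu, h'⟩
            · rw [List.mem_singleton.mp h'] at hu
              exact absurd (pvCell_unique hinv.2.2.1 hg hgt hu htgt) hne
          · rintro ⟨u, hu, hup⟩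
            exact ⟨u, hu, List.mem_append.mpr (Or.inl hup)⟩
        have hgtpref : ¬ ∃ u ∈ gt, u ∈ pref := by
          rintro ⟨u, hu, hup⟩
          have : pvReach roads u t := pvGroupsF_sound towns roads gt hgt u hu t htgt
          exact htv ((hmem t).mpr ⟨u, hup, this⟩)
        by_cases hgt1 : 1 < gt.length
        · rw [if_pos (by rw [hval]; exact_mod_cast hgt1)]
          have hflip := pv_filter_flip (l := pvGroupsF towns roads) hinv.2.2.1 hgt
            (fun hD => by
              rcases List.exists_mem_of_ne_nil gt (hinv.1 gt hgt) with ⟨x, hx⟩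
              exact hD x hx hx)
            (pvCnt pref) (pvCnt (pref ++ [t]))
            hagree
            (by unfold pvCnt; simp only [Bool.and_eq_false_iff]; left; simpa using hgtpref)
            (by unfold pvCnt
                rw [Bool.and_eq_true]
                exact ⟨decide_eq_true ⟨t, htgt, List.mem_append.mpr (Or.inr (List.mem_singleton_self t))⟩,
                  decide_eq_true hgt1⟩)
          refine ⟨b1, hmemnew, ?_⟩
          rw [hcnt, hflip]
          push_cast
          ring
        · rw [if_neg (by rw [hval]; exact_mod_cast hgt1)]
          refine ⟨b1, hmemnew, ?_⟩
          rw [hcnt]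
          congr 2
          apply List.filter_congr
          intro g hg
          by_cases hne : g = gt
          · subst hne
            unfold pvCnt
            have : decide (g.length > 1) = false := by simpa using hgt1
            simp [this]
          · exact (hagree g hg hne).symm
    have hres := ih (pref ++ [t]) htowns' (pvAStep towns roads st t) hstep.1 hstep.2.1 hstep.2.2
    refine ⟨hres.1, ?_, ?_⟩
    · intro x
      rw [hres.2.1 x]
      simp [List.append_assoc]
    · rw [hres.2.2]
      simp [List.append_assoc]

-- ===== final assembly =====
theorem roadNetworks_spec : Claim_equal_roadNetworks := by
  intro towns roads hdom hpre
  unfold Spec_roadNetworks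
  have h0 : roadNetworks towns roads = (towns.foldl (pvAStep towns roads) (PySem.Set.empty, 0)).2 := rfl
  have hinit_mem : ∀ x : String, x ∈ (PySem.Set.empty : PySem.Set String) ↔ ∃ u ∈ ([] : List String), pvReach roads u x := by
    simp [PySem.Set.empty]
  have hinit_cnt : ((PySem.Set.empty : PySem.Set String), (0 : Int)).2
      = (((pvGroupsF towns roads).filter (pvCnt [])).length : Int) := by
    have hnilf : (pvGroupsF towns roads).filter (pvCnt []) = [] :=
      List.filter_eq_nil_iff.mpr (fun g _ => by unfold pvCnt; simp)
    rw [hnilf]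
    simp
  obtain ⟨-, -, hcnt⟩ := pvOuter towns roads hpre towns [] rfl
    ((PySem.Set.empty : PySem.Set String), (0 : Int)) (by simp [PySem.Set.empty]) hinit_mem hinit_cnt
  rw [h0, hcnt]
  have hinv := pvGroupsF_inv towns roads
  have halt : roadNetworks_alt towns roads
      = (((pvGroupsF towns roads).filter (fun g => g.length > 1)).length : Int) := rfl
  rw [halt]
  congr 2
  apply List.filter_congr
  intro g hg
  unfold pvCnt
  have hx : ∃ u ∈ g, u ∈ [] ++ towns := by
    rcases List.exists_mem_of_ne_nil g (hinv.1 g hg) with ⟨x, hx⟩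
    exact ⟨x, hx, (hinv.2.2.2 x).mp ⟨g, hg, hx⟩⟩
  rw [decide_eq_true hx]
  simp
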